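-- pv_equiv track=rewrite | github.com/mimurillof/mi-proyecto-backend | services/portfolio_manager_service.py | desanitize_filename_for_storage
-- ===== SOURCE A (Python) =====
-- def desanitize_filename_for_storage(filename: str) -> str:
--     """
--     Desanitiza un nombre de archivo que fue sanitizado para Supabase Storage.
--     Revierte los reemplazos hechos por sanitize_filename_for_storage() en Portfolio Manager.
--
--     Args:
--         filename: Nombre de archivo sanitizado (ej: "_CARET_SPX_chart.html")
--
--     Returns:
--         Nombre de archivo original (ej: "^SPX_chart.html")
--
--     Examples:
--         >>> desanitize_filename_for_storage("_CARET_SPX_chart.html")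
--         "^SPX_chart.html"
--         >>> desanitize_filename_for_storage("BTC-USD_chart.html")
--         "BTC-USD_chart.html"
--     """
--     # Mapeo inverso de la sanitización
--     reverse_replacements = {
--         '_CARET_': '^',      # Índices como ^SPX, ^GSPC
--         '_LT_': '<',         # Menor que
--         '_GT_': '>',         # Mayor que
--         '_COLON_': ':',      # Dos puntos
--         '_QUOTE_': '"',      # Comillas dobles
--         '_BSLASH_': '\\',    # Barra invertida
--         '_PIPE_': '|',       # Pipe
--         '_QMARK_': '?',      # Signo de interrogación
--         '_STAR_': '*',       # Asterisco
--     }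
--
--     desanitized = filename
--     for sanitized_token, original_char in reverse_replacements.items():
--         desanitized = desanitized.replace(sanitized_token, original_char)
--
--     return desanitized
-- ===== SOURCE B (Python) =====
-- def desanitize_filename_for_storage(filename: str) -> str:
--     # One left-to-right scan instead of nine sequential .replace() passes.
--     tokens = [
--         ('_CARET_', '^'), ('_LT_', '<'), ('_GT_', '>'), ('_COLON_', ':'),
--         ('_QUOTE_', '"'), ('_BSLASH_', '\\'), ('_PIPE_', '|'),
--         ('_QMARK_', '?'), ('_STAR_', '*'),
--     ]
--     parts = []
--     i = 0
--     n = len(filename)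
--     while i < n:
--         for tok, ch in tokens:
--             if filename.startswith(tok, i):
--                 parts.append(ch)
--                 i += len(tok)
--                 break
--         else:
--             parts.append(filename[i])
--             i += 1
--     return ''.join(parts)
-- ===== Notes on version B (the rewrite author's own statement) =====
-- stated objective: alternative
-- what changed: Replaces A's nine sequential str.replace passes by a single left-to-right scan that checks the nine tokens at each position and emits the replacement char or the current char; Pre_ excludes filenames where two distinct tokens overlap on a shared underscore, an ambiguous corner where both A's pass-order answer and B's scan-order answer are defensible.
-- outside the precondition, e.g. on desanitize_filename_for_storage('_COLON_LT_'): A returns '_COLON<', B returns ':LT_'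
import Mathlib
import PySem

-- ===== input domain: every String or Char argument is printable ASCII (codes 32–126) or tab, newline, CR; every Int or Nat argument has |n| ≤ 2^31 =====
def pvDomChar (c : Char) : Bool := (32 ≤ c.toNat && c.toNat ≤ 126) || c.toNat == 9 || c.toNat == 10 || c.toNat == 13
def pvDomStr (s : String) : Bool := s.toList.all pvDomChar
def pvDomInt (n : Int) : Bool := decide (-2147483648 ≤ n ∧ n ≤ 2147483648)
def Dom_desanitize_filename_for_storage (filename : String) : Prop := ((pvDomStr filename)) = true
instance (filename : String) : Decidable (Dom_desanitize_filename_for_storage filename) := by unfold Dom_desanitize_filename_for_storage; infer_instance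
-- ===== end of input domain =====

-- B replaces A's nine sequential str.replace passes by ONE left-to-right scan over the
-- characters; Pre_ excludes the genuinely ambiguous filenames where two distinct tokens
-- overlap on a shared underscore (there A's answer depends on its pass order).

-- ===== PORT A =====
def desanitize_filename_for_storage (filename : String) : String :=
  -- reverse_replacements dict, iterated in insertion order, one str.replace per entry
  let reverse_replacements : List (String × String) :=
    [("_CARET_", "^"), ("_LT_", "<"), ("_GT_", ">"), ("_COLON_", ":"),
     ("_QUOTE_", "\""), ("_BSLASH_", "\\"), ("_PIPE_", "|"), ("_QMARK_", "?"),
     ("_STAR_", "*")]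
  reverse_replacements.foldl (fun desanitized p => PySem.Str.replace desanitized p.1 p.2) filename

-- ===== PORT B =====
def pvTokens : List (List Char × Char) :=
  [("_CARET_".toList, '^'), ("_LT_".toList, '<'), ("_GT_".toList, '>'),
   ("_COLON_".toList, ':'), ("_QUOTE_".toList, '"'), ("_BSLASH_".toList, '\\'),
   ("_PIPE_".toList, '|'), ("_QMARK_".toList, '?'), ("_STAR_".toList, '*')]

-- the while-loop of Source B: at each position try the nine tokens (first match wins, as the
-- for/break does), emit the replacement char or the current char and advance
def pvScan (l : List Char) : List Char :=
  match l with
  | [] => []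
  | c :: rest =>
    match pvTokens.find? (fun p => p.1.isPrefixOf (c :: rest)) with
    | some (t, r) => r :: pvScan (rest.drop (t.length - 1))
    | none => c :: pvScan rest
termination_by l.length
decreasing_by
  · simp only [List.length_drop, List.length_cons]; omega
  · simp

def desanitize_filename_for_storage_alt (filename : String) : String :=
  String.ofList (pvScan filename.toList)

-- ===== PRECONDITION & SPEC =====
def pvPreTokens : List (List Char) :=
  ["_CARET_".toList, "_LT_".toList, "_GT_".toList, "_COLON_".toList, "_QUOTE_".toList,
   "_BSLASH_".toList, "_PIPE_".toList, "_QMARK_".toList, "_STAR_".toList]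

-- Pre_ excludes filenames in which two DISTINCT sanitization tokens overlap on a shared
-- underscore (e.g. "_COLON_LT_", a preimage of both ":LT_" and "_COLON<"): there the
-- desanitization is genuinely ambiguous, no behaviour is specified, and A's pass order
-- and B's scan order each pick one of the two equally defensible answers.
def Pre_desanitize_filename_for_storage (filename : String) : Prop :=
  ∀ X ∈ pvPreTokens, ∀ Y ∈ pvPreTokens, X ≠ Y → ¬ (X.dropLast ++ Y) <:+: filename.toList

instance (filename : String) : Decidable (Pre_desanitize_filename_for_storage filename) := by
  unfold Pre_desanitize_filename_for_storage; infer_instance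

def pvWitness_desanitize_filename_for_storage : String := "_CARET_SPX.html"

def Spec_desanitize_filename_for_storage (filename : String) (out : String) : Prop := out = desanitize_filename_for_storage_alt filename
instance (filename : String) (out : String) : Decidable (Spec_desanitize_filename_for_storage filename out) := by unfold Spec_desanitize_filename_for_storage; infer_instance

-- ===== CLAIM (what is proved, stated in full; the proofs are below) =====
def Claim_equal_desanitize_filename_for_storage : Prop := ∀ (filename : String), Dom_desanitize_filename_for_storage filename → Pre_desanitize_filename_for_storage filename → Spec_desanitize_filename_for_storage filename (desanitize_filename_for_storage filename)

-- ===== LEMMAS AND PROOFS =====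

-- single-token replace, the recursion PySem.Chars.replace.go performs (proved below)
def pvRepl (old new : List Char) (l : List Char) : List Char :=
  match l with
  | [] => []
  | c :: t =>
    if old.isPrefixOf (c :: t) then new ++ pvRepl old new (t.drop (old.length - 1))
    else c :: pvRepl old new t
termination_by l.length
decreasing_by
  · simp only [List.length_drop, List.length_cons]; omega
  · simp

def pvPasses (ps : List (List Char × Char)) (l : List Char) : List Char :=
  ps.foldl (fun s p => pvRepl p.1 [p.2] s) l

-- ---- bridge: PySem.Chars.replace = pvRepl for a nonempty pattern ----
lemma pvGo_spec (old new : List Char) (hold : old ≠ []) :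
    ∀ fuel l acc, l.length ≤ fuel →
      PySem.Chars.replace.go old new fuel l acc = acc.reverse ++ pvRepl old new l := by
  intro fuel
  induction fuel with
  | zero =>
    intro l acc hl
    have : l = [] := List.eq_nil_of_length_eq_zero (Nat.le_zero.mp hl)
    subst this
    rw [PySem.Chars.replace.go, pvRepl]
  | succ n ih =>
    intro l acc hl
    cases l with
    | nil =>
      rw [PySem.Chars.replace.go, pvRepl]
      · simp
      · omega
    | cons c t =>
      rw [PySem.Chars.replace.go, pvRepl]
      by_cases hp : old.isPrefixOf (c :: t) = true
      · simp only [hp, if_true]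
        have hlen : old.length ≥ 1 := by cases old <;> simp_all
        have h1 : List.drop old.length (c :: t) = t.drop (old.length - 1) := by
          cases old with
          | nil => simp_all
          | cons a o => simp [List.drop_succ_cons]
        rw [h1, ih (t.drop (old.length - 1)) (new.reverse ++ acc)
            (by simp only [List.length_drop]; simp at hl; omega)]
        simp
      · simp only [hp, if_false, Bool.false_eq_true]
        rw [ih t (c :: acc) (by simp at hl ⊢; omega)]
        simp

lemma pvReplace_eq (s old new : List Char) (hold : old ≠ []) :
    PySem.Chars.replace s old new = pvRepl old new s := by
  rw [PySem.Chars.replace]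
  have : old.isEmpty = false := by cases old <;> simp_all
  rw [this]
  simp only [Bool.false_eq_true, if_false]
  exact pvGo_spec old new hold s.length s [] (le_refl _)

-- ---- facts about the nine literal tokens ----
lemma pvFact_ne_nil : ∀ p ∈ pvTokens, p.1 ≠ [] := by decide
lemma pvFact_head : ∀ p ∈ pvTokens, p.1.head? = some '_' := by decide
lemma pvFact_last : ∀ p ∈ pvTokens, p.1.getLast? = some '_' := by decide
lemma pvFact_len : ∀ p ∈ pvTokens, p.1.length ≤ 9 := by decide
lemma pvFact_nonprefix :
    ∀ p ∈ pvTokens, ∀ q ∈ pvTokens, p.1 ≠ q.1 → ¬ p.1 <+: q.1 := by decide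
lemma pvFact_notin : ∀ p ∈ pvTokens, ∀ q ∈ pvTokens, p.2 ∉ q.1 := by decide
lemma pvFact_r_ne : ∀ p ∈ pvTokens, p.2 ≠ '_' := by decide
lemma pvFact_interior :
    ∀ p ∈ pvTokens, ∀ i < 10, 0 < i → i + 1 < p.1.length → p.1[i]? ≠ some '_' := by decide
lemma pvPreTokens_eq : pvPreTokens = pvTokens.map (·.1) := by decide

-- ---- structural lemmas about pvRepl ----
lemma pvRepl_nil (old new : List Char) : pvRepl old new [] = [] := by rw [pvRepl]

lemma pvRepl_cons_skip (old new : List Char) (c : Char) (x : List Char)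
    (h : ¬ old <+: (c :: x)) :
    pvRepl old new (c :: x) = c :: pvRepl old new x := by
  rw [pvRepl, if_neg (show ¬ (old.isPrefixOf (c :: x) = true) from
    fun hp => h (List.isPrefixOf_iff_prefix.mp hp))]

-- tokens never match inside the first t.length positions ⇒ the pass skips over t
lemma pvRepl_append (old new t m : List Char)
    (H : ∀ i < t.length, ¬ old <+: (t ++ m).drop i) :
    pvRepl old new (t ++ m) = t ++ pvRepl old new m := by
  induction t with
  | nil => simp
  | cons a t' ih =>
    have h0 : ¬ old <+: (a :: (t' ++ m)) := by
      have := H 0 (by simp)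
      simpa using this
    rw [List.cons_append, pvRepl_cons_skip old new a (t' ++ m) h0,
        ih (fun i hi => by
          have := H (i + 1) (by simp; omega)
          simpa [List.drop_succ_cons] using this)]
    rfl

-- a prefix of the output avoiding the replacement char was a prefix of the input
lemma pvRepl_prefix_reflect_aux (old : List Char) (r : Char) :
    ∀ n (x : List Char), x.length ≤ n → ∀ tp, r ∉ tp → tp <+: pvRepl old [r] x → tp <+: x := by
  intro n
  induction n with
  | zero =>
    intro x hx tp hr h
    have : x = [] := List.eq_nil_of_length_eq_zero (Nat.le_zero.mp hx)
    subst this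
    rw [pvRepl_nil] at h
    simpa using h
  | succ n ih =>
    intro x hx tp hr h
    cases x with
    | nil =>
      rw [pvRepl_nil] at h
      simpa using h
    | cons c t =>
      by_cases hp : old.isPrefixOf (c :: t) = true
      · rw [pvRepl, if_pos hp] at h
        cases tp with
        | nil => simp
        | cons d tp' =>
          exfalso
          rcases List.cons_prefix_cons.mp h with ⟨hd, _⟩
          exact hr (hd ▸ List.mem_cons_self)
      · rw [pvRepl, if_neg hp] at h
        cases tp with
        | nil => simp
        | cons d tp' =>
          rcases List.cons_prefix_cons.mp h with ⟨rfl, h2⟩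
          exact List.cons_prefix_cons.mpr ⟨rfl,
            ih t (by simp at hx; omega) tp' (fun hm => hr (List.mem_cons_of_mem _ hm)) h2⟩

lemma pvRepl_prefix_reflect (old : List Char) (r : Char) (tp x : List Char)
    (hr : r ∉ tp) (h : tp <+: pvRepl old [r] x) : tp <+: x :=
  pvRepl_prefix_reflect_aux old r x.length x (le_refl _) tp hr h

-- ---- lemmas about a fold of passes ----
lemma pvPasses_nil (ps : List (List Char × Char)) : pvPasses ps [] = [] := by
  induction ps with
  | nil => rfl
  | cons p ps' ih => simp only [pvPasses, List.foldl_cons, pvRepl_nil]; exact ih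

-- no token matches at the front ⇒ all passes keep the head char
lemma pvPasses_cons_skip (ps : List (List Char × Char)) (c : Char) (x : List Char)
    (h3 : ∀ p ∈ ps, ∀ q ∈ ps, p.2 ∉ q.1)
    (h : ∀ p ∈ ps, ¬ p.1 <+: (c :: x)) :
    pvPasses ps (c :: x) = c :: pvPasses ps x := by
  induction ps generalizing x with
  | nil => rfl
  | cons p ps' ih =>
    have h1 : pvRepl p.1 [p.2] (c :: x) = c :: pvRepl p.1 [p.2] x :=
      pvRepl_cons_skip _ _ _ _ (h p List.mem_cons_self)
    simp only [pvPasses, List.foldl_cons]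
    rw [h1]
    exact ih (pvRepl p.1 [p.2] x)
      (fun a ha b hb => h3 a (List.mem_cons_of_mem _ ha) b (List.mem_cons_of_mem _ hb))
      (fun q hq hpre' => by
        rw [← h1] at hpre'
        exact h q (List.mem_cons_of_mem _ hq)
          (pvRepl_prefix_reflect p.1 p.2 q.1 (c :: x)
            (h3 p List.mem_cons_self q (List.mem_cons_of_mem _ hq)) hpre'))

-- passes whose token is not t and whose token-tail does not match s skip a leading t
lemma pvPasses_append (ps : List (List Char × Char)) (t s : List Char)
    (ht_int : ∀ i, 0 < i → i + 1 < t.length → t[i]? ≠ some '_')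
    (hnp : ∀ p ∈ ps, ¬ p.1 <+: t ∧ ¬ t <+: p.1)
    (hhead : ∀ p ∈ ps, p.1.head? = some '_')
    (h3 : ∀ p ∈ ps, ∀ q ∈ ps, p.2 ∉ q.1)
    (h4 : ∀ p ∈ ps, ¬ p.1.tail <+: s) :
    pvPasses ps (t ++ s) = t ++ pvPasses ps s := by
  induction ps generalizing s with
  | nil => rfl
  | cons p ps' ih =>
    have hpmem : p ∈ p :: ps' := List.mem_cons_self
    have hpne : p.1 ≠ [] := by
      intro hnil; have := hhead p hpmem; rw [hnil] at this; simp at this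
    have H : ∀ i < t.length, ¬ p.1 <+: (t ++ s).drop i := by
      intro i hi hpre
      rcases Nat.eq_zero_or_pos i with rfl | hipos
      · simp only [List.drop_zero] at hpre
        rcases List.prefix_or_prefix_of_prefix hpre (List.prefix_append t s) with h' | h'
        · exact (hnp p hpmem).1 h'
        · exact (hnp p hpmem).2 h'
      · -- p.1 starts with '_', so position i of t ++ s holds '_'
        have hhd : ((t ++ s).drop i).head? = some '_' := by
          cases hp1 : p.1 with
          | nil => exact absurd hp1 hpne
          | cons a u =>
            have ha : a = '_' := by
              have := hhead p hpmem; rw [hp1] at this; simpa using this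
            rcases hpre with ⟨v, hv⟩
            rw [← hv, hp1, ha]; simp
        rw [List.head?_drop] at hhd
        have hti : t[i]? = some '_' := by
          rwa [List.getElem?_append_left hi] at hhd
        by_cases hlast : i + 1 < t.length
        · exact ht_int i hipos hlast hti
        · -- i = t.length - 1 : the match would be p.1.tail inside s
          have hieq : i = t.length - 1 := by omega
          have hdrop : (t ++ s).drop i = '_' :: s := by
            have h1 : (t ++ s).drop i = t.drop i ++ s := by
              rw [List.drop_append_of_le_length (by omega)]
            have h2 : t.drop i = ['_'] := by
              have hlen : (t.drop i).length = 1 := by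
                simp only [List.length_drop]; omega
              rcases List.length_eq_one_iff.mp hlen with ⟨a, ha⟩
              have : t[i]? = some a := by
                have : (t.drop i).head? = t[i]? := List.head?_drop
                rw [ha] at this; simpa using this.symm
              rw [hti] at this; injection this with h'
              rw [ha, h']
            rw [h1, h2]; rfl
          rw [hdrop] at hpre
          cases hp1 : p.1 with
          | nil => exact absurd hp1 hpne
          | cons a u =>
            rw [hp1] at hpre
            rcases List.cons_prefix_cons.mp hpre with ⟨_, h2⟩
            have : p.1.tail = u := by simp [hp1]
            exact h4 p hpmem (this ▸ h2)
    simp only [pvPasses, List.foldl_cons]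
    rw [pvRepl_append p.1 [p.2] t s H]
    exact ih (pvRepl p.1 [p.2] s)
      (fun a ha => hnp a (List.mem_cons_of_mem _ ha))
      (fun a ha => hhead a (List.mem_cons_of_mem _ ha))
      (fun a ha b hb => h3 a (List.mem_cons_of_mem _ ha) b (List.mem_cons_of_mem _ hb))
      (fun q hq hpre =>
        h4 q (List.mem_cons_of_mem _ hq)
          (pvRepl_prefix_reflect p.1 p.2 q.1.tail s
            (fun hm => h3 p hpmem q (List.mem_cons_of_mem _ hq)
              (List.mem_of_mem_tail hm)) hpre))

-- after emitting a replacement char no token can match at the front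
lemma pvPasses_cons_r (ps : List (List Char × Char)) (r : Char) (m : List Char)
    (hhead : ∀ p ∈ ps, p.1.head? = some '_') (hr : r ≠ '_') :
    pvPasses ps (r :: m) = r :: pvPasses ps m := by
  induction ps generalizing m with
  | nil => rfl
  | cons p ps' ih =>
    have hnp : ¬ p.1 <+: (r :: m) := by
      intro hpre
      cases hp1 : p.1 with
      | nil =>
        have := hhead p List.mem_cons_self; rw [hp1] at this; simp at this
      | cons a u =>
        rw [hp1] at hpre
        rcases List.cons_prefix_cons.mp hpre with ⟨h1, _⟩
        have := hhead p List.mem_cons_self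
        rw [hp1] at this; simp at this
        exact hr (h1 ▸ this)
    simp only [pvPasses, List.foldl_cons]
    rw [pvRepl_cons_skip _ _ _ _ hnp]
    exact ih (pvRepl p.1 [p.2] m) (fun a ha => hhead a (List.mem_cons_of_mem _ ha))

lemma pvRepl_self (t : List Char) (r : Char) (m : List Char) (ht : t ≠ []) :
    pvRepl t [r] (t ++ m) = r :: pvRepl t [r] m := by
  cases t with
  | nil => exact absurd rfl ht
  | cons a t' =>
    rw [List.cons_append, pvRepl,
        if_pos (List.isPrefixOf_iff_prefix.mpr ⟨m, by simp⟩)]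
    simp only [List.length_cons, Nat.add_sub_cancel, List.singleton_append]
    rw [List.drop_left]

-- the precondition, on char lists, and its closure under infix
def pvPreL (l : List Char) : Prop :=
  ∀ X ∈ pvPreTokens, ∀ Y ∈ pvPreTokens, X ≠ Y → ¬ (X.dropLast ++ Y) <:+: l

lemma pvPreL_infix {l l' : List Char} (h : pvPreL l) (hinf : l' <:+: l) : pvPreL l' :=
  fun X hX Y hY hne hin => h X hX Y hY hne (hin.trans hinf)

-- ---- the main induction: nine passes = one scan, on Pre_ ----
lemma pvMain : ∀ n (l : List Char), l.length ≤ n → pvPreL l →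
    pvPasses pvTokens l = pvScan l := by
  intro n
  induction n with
  | zero =>
    intro l hl _
    have : l = [] := by cases l <;> simp_all
    subst this; rw [pvScan]; exact pvPasses_nil _
  | succ n ih =>
    intro l hl hpre
    cases l with
    | nil => rw [pvScan]; exact pvPasses_nil _
    | cons c rest =>
      rw [pvScan]
      cases hfind : pvTokens.find? (fun p => p.1.isPrefixOf (c :: rest)) with
      | none =>
        have hnone := List.find?_eq_none.mp hfind
        rw [pvPasses_cons_skip pvTokens c rest pvFact_notin
            (fun p hp hpre' => hnone p hp (by
              simpa using List.isPrefixOf_iff_prefix.mpr hpre'))]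
        rw [ih rest (by simpa using Nat.lt_succ_iff.mp (by simpa using hl))
            (pvPreL_infix hpre ((List.suffix_cons c rest).isInfix))]
      | some pr =>
        obtain ⟨t, r⟩ := pr
        have hmem : (t, r) ∈ pvTokens := List.mem_of_find?_eq_some hfind
        rcases List.find?_eq_some_iff_append.mp hfind with ⟨hpt, as, bs, hsplit, hnotas⟩
        have hpre0 : t <+: (c :: rest) := List.isPrefixOf_iff_prefix.mp (by simpa using hpt)
        rcases hpre0 with ⟨s, hs⟩
        have htne : t ≠ [] := pvFact_ne_nil _ hmem
        have htlast : t.getLast? = some '_' := pvFact_last _ hmem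
        -- rest.drop (t.length - 1) = s
        have hrest : rest.drop (t.length - 1) = s := by
          cases t with
          | nil => exact absurd rfl htne
          | cons a t' =>
            have : rest = t' ++ s := by
              rw [List.cons_append] at hs
              injection hs with _ h2
              exact h2.symm
            rw [this]
            simp only [List.length_cons, Nat.add_sub_cancel]
            exact List.drop_left
        -- decompose the fold
        have hfold : pvPasses pvTokens (t ++ s)
            = pvPasses bs (pvRepl t [r] (pvPasses as (t ++ s))) := by
          rw [hsplit]
          simp [pvPasses, List.foldl_append]
        have hasmem : ∀ p ∈ as, p ∈ pvTokens := by
          intro p hp; rw [hsplit]; exact List.mem_append_left _ hp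
        have hbsmem : ∀ p ∈ bs, p ∈ pvTokens := by
          intro p hp; rw [hsplit]
          exact List.mem_append_right _ (List.mem_cons_of_mem _ hp)
        have hasne : ∀ p ∈ as, p.1 ≠ t := by
          intro p hp heq
          have h2 := hnotas p hp
          simp only [Bool.not_eq_eq_eq_not, Bool.not_true] at h2
          rw [heq] at h2
          have h1 : t.isPrefixOf (c :: rest) = true := by simpa using hpt
          rw [h1] at h2
          exact absurd h2 (by simp)
        have htmemL : t ∈ pvPreTokens := by
          rw [pvPreTokens_eq]; exact List.mem_map_of_mem hmem
        have hpre' : pvPreL (t ++ s) := hs ▸ hpre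
        -- pre passes skip the leading t
        have hstep1 : pvPasses as (t ++ s) = t ++ pvPasses as s := by
          apply pvPasses_append as t s
          · intro i hipos hilt hti
            have := pvFact_interior (t, r) hmem i
              (by have := pvFact_len (t, r) hmem; simp at this ⊢; omega) hipos hilt
            exact this hti
          · intro p hp
            constructor
            · exact pvFact_nonprefix p (hasmem p hp) (t, r) hmem (hasne p hp)
            · exact pvFact_nonprefix (t, r) hmem p (hasmem p hp) (fun h => hasne p hp h.symm)
          · intro p hp; exact pvFact_head p (hasmem p hp)
          · intro p hp q hq; exact pvFact_notin p (hasmem p hp) q (hasmem q hq)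
          · intro p hp htail
            -- p.1.tail <+: s would put t.dropLast ++ p.1 inside t ++ s
            have hpne : p.1 ≠ [] := by
              intro hnil
              have := pvFact_head p (hasmem p hp); rw [hnil] at this; simp at this
            have hphead : p.1 = '_' :: p.1.tail := by
              cases hp1 : p.1 with
              | nil => exact absurd hp1 hpne
              | cons a u =>
                have := pvFact_head p (hasmem p hp)
                rw [hp1] at this; simp at this
                simp [this]
            have htdecomp : t = t.dropLast ++ ['_'] := by
              conv_lhs => rw [← List.dropLast_append_getLast htne]
              congr 1
              have h0 := htlast
              rw [List.getLast?_eq_some_getLast htne] at h0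
              injection h0 with h'
              simp [h']
            have : (t.dropLast ++ p.1) <+: (t ++ s) := by
              rw [hphead, htdecomp]
              rcases htail with ⟨u, hu⟩
              exact ⟨u, by simp [← hu]⟩
            have hpmemL : p.1 ∈ pvPreTokens := by
              rw [pvPreTokens_eq]; exact List.mem_map_of_mem (hasmem p hp)
            exact hpre' t htmemL p.1 hpmemL (fun h => hasne p hp h.symm) this.isInfix
        -- t's own pass fires, later passes keep r
        have hstep2 : pvRepl t [r] (t ++ pvPasses as s) = r :: pvRepl t [r] (pvPasses as s) :=
          pvRepl_self t r _ htne
        have hstep3 : pvPasses bs (r :: pvRepl t [r] (pvPasses as s))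
            = r :: pvPasses bs (pvRepl t [r] (pvPasses as s)) :=
          pvPasses_cons_r bs r _ (fun p hp => pvFact_head p (hbsmem p hp))
            (pvFact_r_ne (t, r) hmem)
        have hrecomp : pvPasses bs (pvRepl t [r] (pvPasses as s)) = pvPasses pvTokens s := by
          rw [hsplit]; simp [pvPasses, List.foldl_append]
        have hslen : s.length ≤ n := by
          have h1 : (c :: rest).length = t.length + s.length := by
            rw [← hs]; simp
          have h2 : 1 ≤ t.length := by cases t <;> simp_all
          simp at hl h1; omega
        have hpres : pvPreL s :=
          pvPreL_infix hpre' ⟨t, [], by simp⟩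
        calc pvPasses pvTokens (c :: rest)
            = pvPasses pvTokens (t ++ s) := by rw [hs]
          _ = pvPasses bs (pvRepl t [r] (pvPasses as (t ++ s))) := hfold
          _ = pvPasses bs (pvRepl t [r] (t ++ pvPasses as s)) := by rw [hstep1]
          _ = pvPasses bs (r :: pvRepl t [r] (pvPasses as s)) := by rw [hstep2]
          _ = r :: pvPasses bs (pvRepl t [r] (pvPasses as s)) := hstep3
          _ = r :: pvPasses pvTokens s := by rw [hrecomp]
          _ = r :: pvScan s := by rw [ih s hslen hpres]
          _ = r :: pvScan (rest.drop (t.length - 1)) := by rw [hrest]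

-- ---- assembling the String-level statement ----
lemma pvA_eq_passes (filename : String) :
    desanitize_filename_for_storage filename
      = String.ofList (pvPasses pvTokens filename.toList) := by
  simp only [desanitize_filename_for_storage, pvPasses, pvTokens, List.foldl_cons,
    List.foldl_nil, PySem.Str.replace]
  simp only [String.toList_ofList]
  rw [pvReplace_eq _ _ _ (by decide), pvReplace_eq _ _ _ (by decide),
      pvReplace_eq _ _ _ (by decide), pvReplace_eq _ _ _ (by decide),
      pvReplace_eq _ _ _ (by decide), pvReplace_eq _ _ _ (by decide),
      pvReplace_eq _ _ _ (by decide), pvReplace_eq _ _ _ (by decide),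
      pvReplace_eq _ _ _ (by decide)]
  rfl

-- ===== VERDICT (by name: the statement is the Claim_ definition above) =====
theorem desanitize_filename_for_storage_spec : Claim_equal_desanitize_filename_for_storage := by
  intro filename _ hpre
  unfold Spec_desanitize_filename_for_storage desanitize_filename_for_storage_alt
  rw [pvA_eq_passes]
  congr 1
  exact pvMain filename.toList.length filename.toList (le_refl _) hpre
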